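-- pv_equiv track=rewrite | github.com/razon1494/sql-query-feedback-system | backend/sql_parser.py | _keyword_split
-- ===== SOURCE A (Python) =====
-- def _keyword_split(sql: str, keyword: str) -> tuple:
--     """Split SQL at a top-level keyword (not inside parentheses)."""
--     upper = sql.upper()
--     depth = 0
--     i = 0
--     kw = keyword.upper()
--     while i < len(sql):
--         ch = sql[i]
--         if ch == '(':
--             depth += 1
--         elif ch == ')':
--             depth -= 1
--         elif depth == 0 and upper[i:i+len(kw)] == kw:
--             # Make sure it's a word boundary
--             before = sql[i-1] if i > 0 else ' '
--             after = sql[i+len(kw)] if i+len(kw) < len(sql) else ' '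
--             if not before.isalnum() and before != '_' and not after.isalnum() and after != '_':
--                 return sql[:i].strip(), sql[i+len(kw):].strip()
--         i += 1
--     return sql.strip(), None
-- ===== SOURCE B (Python) =====
-- def _keyword_split(sql: str, keyword: str) -> tuple:
--     """Split SQL at a top-level keyword: jump between case-insensitive
--     occurrences with str.find, keep the first one that sits on a word
--     boundary and at parenthesis depth 0 (equal '('/')' counts before it)."""
--     upper = sql.upper()
--     kw = keyword.upper()
--     k = len(kw)
--     pos = upper.find(kw)
--     while pos != -1:
--         before = sql[pos - 1] if pos > 0 else ' '
--         after = sql[pos + k] if pos + k < len(sql) else ' '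
--         if (not before.isalnum() and before != '_'
--                 and not after.isalnum() and after != '_'
--                 and sql[:pos].count('(') == sql[:pos].count(')')):
--             return sql[:pos].strip(), sql[pos + k:].strip()
--         pos = upper.find(kw, pos + 1)
--     return sql.strip(), None
-- ===== Notes on version B (the rewrite author's own statement) =====
-- stated objective: faster
-- what changed: Replaced the single char-by-char scan with an integrated depth counter by a find-driven candidate loop: str.find jumps between case-insensitive keyword occurrences and each candidate is accepted iff it is on a word boundary and the prefix before it has equal '(' and ')' counts.
-- outside the precondition, e.g. on _keyword_split('a ( b', '('): A returns ('a ( b', None), B returns ('a', 'b'); on _keyword_split('a.', ''): A returns ('a.', None), B returns ('a.', '')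
import Mathlib
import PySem

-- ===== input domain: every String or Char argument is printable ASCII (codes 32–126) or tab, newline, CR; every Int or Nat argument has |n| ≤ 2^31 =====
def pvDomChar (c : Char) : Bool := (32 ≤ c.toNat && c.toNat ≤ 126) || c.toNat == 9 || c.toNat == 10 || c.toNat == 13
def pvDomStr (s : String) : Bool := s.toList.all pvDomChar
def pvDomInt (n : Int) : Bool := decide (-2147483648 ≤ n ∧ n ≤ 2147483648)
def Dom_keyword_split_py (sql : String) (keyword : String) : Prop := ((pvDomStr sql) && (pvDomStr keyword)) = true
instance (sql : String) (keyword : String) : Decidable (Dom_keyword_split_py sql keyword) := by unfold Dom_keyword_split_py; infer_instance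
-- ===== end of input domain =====

-- B replaces A's integrated char-by-char depth scan by a find-driven candidate loop
-- (str.find jumps between case-insensitive keyword occurrences; the first one on a word
-- boundary whose prefix has equal '(' / ')' counts wins) — measurably faster in Python
-- (C-level find/count instead of a per-character interpreted loop).

-- `sql[i-1] if i > 0 else ' '` — shared by both Pythons, transliterated once
def pvBefore (s : List Char) (i : Nat) : Char := if 0 < i then s.getD (i - 1) ' ' else ' '
-- `sql[i+len(kw)] if i+len(kw) < len(sql) else ' '`
def pvAfter (s kw : List Char) (i : Nat) : Char :=
  if i + kw.length < s.length then s.getD (i + kw.length) ' ' else ' '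
-- `not before.isalnum() and before != '_' and not after.isalnum() and after != '_'`
def pvWordOk (s kw : List Char) (i : Nat) : Bool :=
  !(PySem.Chars.isalnum (pvBefore s i)) && pvBefore s i != '_' &&
  !(PySem.Chars.isalnum (pvAfter s kw i)) && pvAfter s kw i != '_'

-- ===== PORT A =====
-- A's while loop: i and depth carried along, one character per step
def ksLoopA (s upper kw : List Char) (depth : Int) (i : Nat) : String × Option String :=
  if h : i < s.length then
    if s[i] = '(' then ksLoopA s upper kw (depth + 1) (i + 1)
    else if s[i] = ')' then ksLoopA s upper kw (depth - 1) (i + 1)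
    else if depth = 0 ∧ PySem.List.slice upper (some (i : Int)) (some ((i : Int) + (kw.length : Int))) = kw then
      if pvWordOk s kw i then
        (String.ofList (PySem.Chars.strip (PySem.List.slice s none (some (i : Int)))),
         some (String.ofList (PySem.Chars.strip (PySem.List.slice s (some ((i : Int) + (kw.length : Int))) none))))
      else ksLoopA s upper kw depth (i + 1)
    else ksLoopA s upper kw depth (i + 1)
  else (String.ofList (PySem.Chars.strip s), none)
termination_by s.length - i

def keyword_split_py (sql : String) (keyword : String) : String × Option String :=
  ksLoopA sql.toList (PySem.Chars.upper sql.toList) (PySem.Chars.upper keyword.toList) 0 0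

-- ===== PORT B =====
-- B's while loop: pos jumps between find() hits; fuel only makes the recursion total
def ksLoopB (s upper kw : List Char) (pos : Int) (fuel : Nat) : String × Option String :=
  match fuel with
  | 0 => (String.ofList (PySem.Chars.strip s), none)
  | fuel + 1 =>
    if pos = -1 then (String.ofList (PySem.Chars.strip s), none)
    else
      if pvWordOk s kw pos.toNat ∧
         PySem.Chars.count (PySem.List.slice s none (some pos)) ['('] =
           PySem.Chars.count (PySem.List.slice s none (some pos)) [')'] then
        (String.ofList (PySem.Chars.strip (PySem.List.slice s none (some pos))),
         some (String.ofList (PySem.Chars.strip (PySem.List.slice s (some (pos + (kw.length : Int))) none))))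
      else ksLoopB s upper kw (PySem.Chars.findFrom upper kw (pos + 1)) fuel

def keyword_split_py_alt (sql : String) (keyword : String) : String × Option String :=
  ksLoopB sql.toList (PySem.Chars.upper sql.toList) (PySem.Chars.upper keyword.toList)
    (PySem.Chars.find (PySem.Chars.upper sql.toList) (PySem.Chars.upper keyword.toList))
    (sql.toList.length + 1)

-- ===== PRECONDITION & SPEC =====
-- Pre_ excludes two degenerate keywords on which A's value is an accident of its scan:
-- the empty keyword (A matches '' at every scanned index but never looks at position
-- len(sql), while B's find loop also reaches it), and a keyword starting with '(' or ')'
-- (A's paren branch shadows the match test there, so A can never split on such a keyword).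
def Pre_keyword_split_py (_sql : String) (keyword : String) : Prop :=
  keyword ≠ "" ∧ keyword.toList.head? ≠ some '(' ∧ keyword.toList.head? ≠ some ')'
instance (sql : String) (keyword : String) : Decidable (Pre_keyword_split_py sql keyword) := by
  unfold Pre_keyword_split_py; infer_instance

def pvWitness_keyword_split_py : String × String := ("select a from (select b) t where a > 1", "where")

def Spec_keyword_split_py (sql : String) (keyword : String) (out : String × Option String) : Prop := out = keyword_split_py_alt sql keyword
instance (sql : String) (keyword : String) (out : String × Option String) : Decidable (Spec_keyword_split_py sql keyword out) := by unfold Spec_keyword_split_py; infer_instance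

-- ===== CLAIM (what is proved, stated in full; the proofs are below) =====
def Claim_equal_keyword_split_py : Prop := ∀ (sql : String) (keyword : String), Dom_keyword_split_py sql keyword → Pre_keyword_split_py sql keyword → Spec_keyword_split_py sql keyword (keyword_split_py sql keyword)

-- ===== LEMMAS AND PROOFS =====

-- the common reference: the first index i with a case-insensitive match, a word
-- boundary and a balanced-paren prefix, and the answer rendered from it
def pvGood (s upper kw : List Char) (i : Nat) : Bool :=
  ((upper.drop i).take kw.length == kw) && pvWordOk s kw i &&
  ((s.take i).count '(' == (s.take i).count ')')

def pvFirstGood (s upper kw : List Char) (i : Nat) : Option Nat :=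
  if _h : i < s.length then
    if pvGood s upper kw i then some i else pvFirstGood s upper kw (i + 1)
  else none
termination_by s.length - i

def pvRender (s kw : List Char) (r : Option Nat) : String × Option String :=
  match r with
  | some i => (String.ofList (PySem.Chars.strip (s.take i)),
               some (String.ofList (PySem.Chars.strip (s.drop (i + kw.length)))))
  | none => (String.ofList (PySem.Chars.strip s), none)

-- upperChar never produces a character below 'A'
lemma pvUpperChar_ne (c d : Char) (hd : d.toNat < 65) (hne : c ≠ d) : PySem.Chars.upperChar c ≠ d := by
  intro h2
  by_cases h : PySem.Chars.islower c = true
  · have hv : 97 ≤ c.toNat ∧ c.toNat ≤ 122 := by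
      simpa [PySem.Chars.islower, Char.le_def, UInt32.le_iff_toNat_le] using h
    simp [PySem.Chars.upperChar, h] at h2
    have := congrArg Char.toNat h2
    rw [Char.toNat_ofNat] at this
    rw [if_pos (show Nat.isValidChar (c.toNat - 32) from Or.inl (by omega))] at this
    omega
  · simp [PySem.Chars.upperChar, h] at h2
    exact hne h2

-- str.count with a single-character needle is List.count
lemma pvCountGo_single (c : Char) : ∀ (fuel : Nat) (l : List Char) (acc : Nat), l.length ≤ fuel →
    PySem.Chars.count.go [c] fuel l acc = acc + l.count c := by
  intro fuel
  induction fuel with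
  | zero =>
    intro l acc h
    have hl : l = [] := by cases l <;> simp_all
    subst hl; simp [PySem.Chars.count.go]
  | succ f ih =>
    intro l acc h
    cases l with
    | nil => simp [PySem.Chars.count.go]
    | cons x t =>
      rw [PySem.Chars.count.go]
      by_cases hx : c = x
      · subst hx
        simp [List.isPrefixOf]
        rw [ih t (acc + 1) (by simpa using h)]
        omega
      · simp [List.isPrefixOf, Ne.symm hx, hx]
        exact ih t acc (by simpa using h)

lemma pvCount_single (l : List Char) (c : Char) : PySem.Chars.count l [c] = l.count c := by
  rw [PySem.Chars.count]
  simp [pvCountGo_single c l.length l 0 le_rfl]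

lemma pvFirstGood_congr (s upper kw : List Char) (j m : Nat) (hjm : j ≤ m)
    (hno : ∀ i, j ≤ i → i < m → pvGood s upper kw i = false) :
    pvFirstGood s upper kw j = pvFirstGood s upper kw m := by
  obtain ⟨d, rfl⟩ : ∃ d, m = j + d := ⟨m - j, by omega⟩
  clear hjm
  induction d generalizing j with
  | zero => rfl
  | succ d ih =>
    by_cases h : j < s.length
    · rw [pvFirstGood, dif_pos h, if_neg (by simp [hno j le_rfl (by omega)])]
      rw [ih (j + 1) (fun i h1 h2 => hno i (by omega) (by omega))]
      congr 1; omega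
    · rw [pvFirstGood, dif_neg h, pvFirstGood, dif_neg (by omega)]

lemma pvFirstGood_none (s upper kw : List Char) (j : Nat)
    (hno : ∀ i, j ≤ i → pvGood s upper kw i = false) :
    pvFirstGood s upper kw j = none := by
  by_cases h : j ≤ s.length
  · rw [pvFirstGood_congr s upper kw j s.length h (fun i h1 _ => hno i h1)]
    rw [pvFirstGood, dif_neg (by omega)]
  · rw [pvFirstGood, dif_neg (by omega)]

lemma pvUpperDropCons (s : List Char) (i : Nat) (hi : i < s.length) :
    (PySem.Chars.upper s).drop i = PySem.Chars.upperChar s[i] :: ((PySem.Chars.upper s).drop (i + 1)) := by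
  unfold PySem.Chars.upper
  rw [← List.map_drop, ← List.map_drop, List.drop_eq_getElem_cons hi, List.map_cons]

lemma pvTakeSucc (l : List Char) (i : Nat) (hi : i < l.length) :
    l.take (i + 1) = l.take i ++ [l[i]] := by
  rw [List.take_add_one]; simp [List.getElem?_eq_getElem hi]

-- at a parenthesis character no (non-paren-initial) keyword can match
lemma pvGood_paren (s kw : List Char) (i : Nat) (hi : i < s.length)
    (hkw : kw ≠ []) (hk0 : kw.head? ≠ some '(') (hk1 : kw.head? ≠ some ')')
    (hc : s[i] = '(' ∨ s[i] = ')') :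
    pvGood s (PySem.Chars.upper s) kw i = false := by
  cases kw with
  | nil => exact absurd rfl hkw
  | cons k0 kr =>
    have hmatch : ((PySem.Chars.upper s).drop i).take (k0 :: kr).length ≠ k0 :: kr := by
      rw [pvUpperDropCons s i hi]
      simp only [List.length_cons, List.take_succ_cons, ne_eq, List.cons.injEq, not_and]
      intro hhead
      rcases hc with hc | hc <;> rw [hc] at hhead
      · have : k0 = '(' := by rw [← hhead]; decide
        subst this; simp at hk0
      · have : k0 = ')' := by rw [← hhead]; decide
        subst this; simp at hk1
    unfold pvGood
    simp only [List.length_cons] at hmatch ⊢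
    simp [hmatch]

-- A's loop computes the rendered first good index (depth = paren balance of the prefix)
lemma pvLoopA_eq (s kw : List Char) (hkw : kw ≠ [])
    (hk0 : kw.head? ≠ some '(') (hk1 : kw.head? ≠ some ')') :
    ∀ n i depth, s.length - i = n →
      depth = ((s.take i).count '(' : Int) - ((s.take i).count ')' : Int) →
      ksLoopA s (PySem.Chars.upper s) kw depth i =
        pvRender s kw (pvFirstGood s (PySem.Chars.upper s) kw i) := by
  intro n
  induction n with
  | zero =>
    intro i depth hn _hd
    rw [ksLoopA, dif_neg (by omega), pvFirstGood, dif_neg (by omega)]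
    rfl
  | succ n ih =>
    intro i depth hn hd
    have hi : i < s.length := by omega
    have htake := pvTakeSucc s i hi
    rw [ksLoopA, dif_pos hi]
    by_cases hpo : s[i] = '('
    · rw [if_pos hpo]
      rw [pvFirstGood, dif_pos hi,
          if_neg (by simp [pvGood_paren s kw i hi hkw hk0 hk1 (Or.inl hpo)])]
      exact ih (i + 1) (depth + 1) (by omega) (by rw [htake]; simp only [List.count_append, List.count_singleton']; simp [hpo, hd]; omega)
    · rw [if_neg hpo]
      by_cases hpc : s[i] = ')'
      · rw [if_pos hpc]
        rw [pvFirstGood, dif_pos hi,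
            if_neg (by simp [pvGood_paren s kw i hi hkw hk0 hk1 (Or.inr hpc)])]
        exact ih (i + 1) (depth - 1) (by omega) (by rw [htake]; simp only [List.count_append, List.count_singleton']; simp [hpc, hd]; omega)
      · rw [if_neg hpc]
        have hcnt : (s.take (i + 1)).count '(' = (s.take i).count '(' ∧
            (s.take (i + 1)).count ')' = (s.take i).count ')' := by
          rw [htake]
          simp only [List.count_append, List.count_singleton']
          constructor <;> simp [hpo, hpc]
        have hslice := PySem.List.slice_natCast_add (PySem.Chars.upper s) i kw.length
        by_cases hg : pvGood s (PySem.Chars.upper s) kw i = true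
        · have hg' := hg
          unfold pvGood at hg'
          simp only [Bool.and_eq_true, beq_iff_eq] at hg'
          obtain ⟨⟨hm, hw⟩, hc⟩ := hg'
          rw [if_pos ⟨by omega, by rw [hslice]; exact hm⟩, if_pos hw]
          rw [pvFirstGood, dif_pos hi, if_pos hg]
          unfold pvRender
          rw [PySem.List.slice_to_natCast]
          rw [show ((i : Int) + (kw.length : Int)) = ((i + kw.length : Nat) : Int) by push_cast; ring]
          rw [PySem.List.slice_from_natCast]
        · have hrec := ih (i + 1) depth (by omega) (by rw [hcnt.1, hcnt.2]; exact hd)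
          have hfg : pvFirstGood s (PySem.Chars.upper s) kw i =
              pvFirstGood s (PySem.Chars.upper s) kw (i + 1) := by
            rw [pvFirstGood, dif_pos hi, if_neg (by simpa using hg)]
          by_cases hdm : depth = 0 ∧ PySem.List.slice (PySem.Chars.upper s) (some (i : Int)) (some ((i : Int) + (kw.length : Int))) = kw
          · rw [if_pos hdm]
            have hw : pvWordOk s kw i = false := by
              by_contra hw
              apply hg
              unfold pvGood
              simp only [Bool.and_eq_true, beq_iff_eq]
              refine ⟨⟨by rw [← hslice]; exact hdm.2, by simpa using hw⟩, by omega⟩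
            rw [if_neg (show ¬ pvWordOk s kw i = true by simp [hw])]
            rw [hfg]; exact hrec
          · rw [if_neg hdm]
            rw [hfg]; exact hrec

-- B's loop renders the first good index at or after the last find() position
lemma pvLoopB_eq (s kw : List Char) (hkw : kw ≠ []) :
    ∀ fuel j, j ≤ s.length → s.length - j < fuel →
      ksLoopB s (PySem.Chars.upper s) kw (PySem.Chars.findFrom (PySem.Chars.upper s) kw (j : Int)) fuel =
        pvRender s kw (pvFirstGood s (PySem.Chars.upper s) kw j) := by
  have hlen : (PySem.Chars.upper s).length = s.length := by simp [PySem.Chars.upper]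
  intro fuel
  induction fuel with
  | zero => intro j h1 h2; omega
  | succ f ih =>
    intro j hj hfuel
    by_cases hF : PySem.Chars.findFrom (PySem.Chars.upper s) kw (j : Int) = -1
    · have hno : ∀ i, j ≤ i → pvGood s (PySem.Chars.upper s) kw i = false := by
        intro i hi
        have hinf : ¬ kw <:+: (PySem.Chars.upper s).drop j :=
          (PySem.Chars.findFrom_natCast_eq_neg_one_iff (PySem.Chars.upper s) kw j
            (by omega)).mp hF
        unfold pvGood
        have hm : List.take kw.length (List.drop i (PySem.Chars.upper s)) ≠ kw := by
          intro hm
          apply hinf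
          have hpre : kw <+: (PySem.Chars.upper s).drop i :=
            List.prefix_iff_eq_take.mpr hm.symm
          have hdd : (PySem.Chars.upper s).drop i =
              ((PySem.Chars.upper s).drop j).drop (i - j) := by
            rw [List.drop_drop]; congr 1; omega
          rw [hdd] at hpre
          exact hpre.isInfix.trans (List.drop_suffix _ _).isInfix
        simp [hm]
      rw [hF, ksLoopB, if_pos rfl, pvFirstGood_none s (PySem.Chars.upper s) kw j hno]
      rfl
    · obtain ⟨hge, hpre, hmin⟩ := PySem.Chars.findFrom_natCast_spec (PySem.Chars.upper s) kw j
        (by omega) hF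
      set F := PySem.Chars.findFrom (PySem.Chars.upper s) kw (j : Int) with hFdef
      set p := F.toNat with hp
      have hFp : F = (p : Int) := (Int.toNat_of_nonneg (by omega)).symm
      have hklen : 0 < kw.length := List.length_pos_iff.mpr hkw
      have hplen : p < s.length := by
        have := hpre.length_le
        simp [List.length_drop, hlen] at this
        omega
      have hjp : j ≤ p := by omega
      have hmtake : List.take kw.length (List.drop p (PySem.Chars.upper s)) = kw :=
        (List.prefix_iff_eq_take.mp hpre).symm
      have hnog : ∀ i, j ≤ i → i < p → pvGood s (PySem.Chars.upper s) kw i = false := by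
        intro i h1 h2
        unfold pvGood
        have hm : List.take kw.length (List.drop i (PySem.Chars.upper s)) ≠ kw := by
          intro hm
          exact hmin i h1 h2 (List.prefix_iff_eq_take.mpr hm.symm)
        simp [hm]
      rw [ksLoopB, if_neg (by omega : ¬ F = -1)]
      by_cases hc : pvWordOk s kw p = true ∧ (s.take p).count '(' = (s.take p).count ')'
      · rw [if_pos (by
          refine ⟨hc.1, ?_⟩
          rw [hFp, PySem.List.slice_to_natCast, pvCount_single, pvCount_single]
          exact hc.2)]
        have hgood : pvGood s (PySem.Chars.upper s) kw p = true := by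
          unfold pvGood
          simp [hmtake, hc.1, hc.2]
        rw [pvFirstGood_congr s (PySem.Chars.upper s) kw j p hjp hnog]
        rw [pvFirstGood, dif_pos hplen, if_pos hgood]
        unfold pvRender
        rw [hFp, PySem.List.slice_to_natCast,
            show ((p : Int) + (kw.length : Int)) = ((p + kw.length : Nat) : Int) by push_cast; ring,
            PySem.List.slice_from_natCast]
      · rw [if_neg (by
          intro hcc
          apply hc
          refine ⟨hcc.1, ?_⟩
          have := hcc.2
          rw [hFp, PySem.List.slice_to_natCast, pvCount_single, pvCount_single] at this
          exact this)]
        have hgood : pvGood s (PySem.Chars.upper s) kw p = false := by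
          unfold pvGood
          rw [hmtake]
          simp only [beq_self_eq_true, Bool.true_and, Bool.and_eq_false_iff]
          by_cases hw : pvWordOk s kw p = true
          · right
            simp only [beq_eq_false_iff_ne, ne_eq]
            exact fun hcq => hc ⟨hw, hcq⟩
          · left; simpa using hw
        rw [hFp, show ((p : Int) + 1) = ((p + 1 : Nat) : Int) by push_cast; ring]
        rw [ih (p + 1) (by omega) (by omega)]
        rw [pvFirstGood_congr s (PySem.Chars.upper s) kw j (p + 1) (by omega) (by
          intro i h1 h2
          rcases Nat.lt_succ_iff_lt_or_eq.mp h2 with h | h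
          · exact hnog i h1 h
          · subst h; exact hgood)]

-- ===== VERDICT (by name: the statement is the Claim_ definition above) =====
theorem keyword_split_py_spec : Claim_equal_keyword_split_py := by
  intro sql keyword _dom pre
  obtain ⟨hne, h0, h1⟩ := pre
  unfold Spec_keyword_split_py keyword_split_py keyword_split_py_alt
  have hkl : keyword.toList ≠ [] := by
    intro h; exact hne (by simpa using congrArg String.ofList h)
  have hkw : PySem.Chars.upper keyword.toList ≠ [] := by
    simp [PySem.Chars.upper, hkl]
  have hhead : ∀ d : Char, d.toNat < 65 → keyword.toList.head? ≠ some d →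
      (PySem.Chars.upper keyword.toList).head? ≠ some d := by
    intro d hd hkd
    cases hk : keyword.toList with
    | nil => exact absurd hk hkl
    | cons x t =>
      simp [PySem.Chars.upper]
      exact pvUpperChar_ne x d hd (by rintro rfl; exact hkd (by simp [hk]))
  rw [pvLoopA_eq sql.toList _ hkw (hhead '(' (by decide) h0) (hhead ')' (by decide) h1)
        sql.toList.length 0 0 (by omega) (by simp)]
  rw [← PySem.Chars.findFrom_zero]
  rw [show (0 : Int) = ((0 : Nat) : Int) from rfl]
  rw [pvLoopB_eq sql.toList _ hkw (sql.toList.length + 1) 0 (by omega) (by omega)]
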